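-- pv_equiv track=rewrite | github.com/franpuch/Laboratorio-De-Datos | Guías Prácticas/Clase 4/Tarea_1.py | superanSalarioActividad04
-- ===== SOURCE A (Python) =====
-- def cambiarColumnas(matriz:list[list[int]], columna_1:int, columna_2:int) -> list[list[int]] :
--     res:list[list[int]] = list()
--
--     for fila in matriz :
--         nueva_fila:list[list[int]] = list()
--         for j in range(0, len(fila)) :
--             if ((j != columna_1 - 1) and (j != columna_2 - 1)) :
--                 nueva_fila.append(fila[j])
--             elif (j == columna_1 - 1) :
--                 nueva_fila.append(fila[columna_2 - 1])
--             elif (j == columna_2 - 1) :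
--                 nueva_fila.append(fila[columna_1 - 1])
--
--         res.append(nueva_fila)
--
--     return res
--
-- def superanSalarioActividad04(matriz:list[list[int]], umbral:int) -> list[list[int]] :
--
--     if (len(matriz) == 0) :
--         return []
--
--     res:list[list[int]] = []
--     index_aux:int = 0
--
--     for salario in matriz[1] :
--         if (salario > umbral) :
--             valido:list[int] = []
--             for i in matriz :
--                 valido.append(i[index_aux])
--             res.append(valido)
--         index_aux += 1
--
--     # Aprovecho la función que armé antes (que me facilita bastante el trabajo de devolver
--     # las columnas ordenadas de la forma que pide).
--     res = cambiarColumnas(res, 2, 3)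
--     res = cambiarColumnas(res, 3, 4)
--
--     return res
-- ===== SOURCE B (Python) =====
-- def superanSalarioActividad04(matriz, umbral):
--     if len(matriz) == 0:
--         return []
--     # columns whose entry in row 1 exceeds the threshold
--     selected = [idx for idx, salario in enumerate(matriz[1]) if salario > umbral]
--     # the two column swaps of A compose into one fixed permutation of the rows
--     order = [0, 2, 3, 1] + list(range(4, len(matriz)))
--     return [[matriz[r][idx] for r in order] for idx in selected]
-- ===== Notes on version B (the rewrite author's own statement) =====
-- stated objective: simpler
-- what changed: B replaces A's counter loop plus two full cambiarColumnas rebuild passes by one comprehension that reads each selected column directly through the fixed row permutation [0,2,3,1]+range(4,len) (the composition of A's two swaps).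
import Mathlib
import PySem

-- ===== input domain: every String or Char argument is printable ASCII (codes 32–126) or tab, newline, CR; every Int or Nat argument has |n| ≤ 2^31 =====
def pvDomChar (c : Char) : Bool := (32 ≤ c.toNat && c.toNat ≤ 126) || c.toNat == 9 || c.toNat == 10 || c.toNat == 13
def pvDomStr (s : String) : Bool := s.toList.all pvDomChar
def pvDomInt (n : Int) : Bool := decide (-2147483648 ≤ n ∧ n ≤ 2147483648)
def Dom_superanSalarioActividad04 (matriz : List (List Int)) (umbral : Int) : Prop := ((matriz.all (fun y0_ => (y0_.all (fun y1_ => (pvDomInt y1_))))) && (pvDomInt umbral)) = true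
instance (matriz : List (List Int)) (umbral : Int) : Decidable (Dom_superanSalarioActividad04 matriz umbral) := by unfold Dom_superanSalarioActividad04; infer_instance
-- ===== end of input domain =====

-- B builds each selected column directly through the fixed row permutation [0,2,3,1]+range(4,len),
-- replacing A's two cambiarColumnas rebuild passes (objective: simpler).

-- ===== PORT A =====
def cambiarColumnas (matriz : List (List Int)) (columna_1 columna_2 : Int) : List (List Int) :=
  matriz.foldl (fun res fila =>
    res ++ [(PySem.List.pyRange 0 (fila.length : Int) 1).foldl (fun nueva_fila j =>
        if j ≠ columna_1 - 1 ∧ j ≠ columna_2 - 1 then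
          nueva_fila ++ [PySem.List.pyGetD fila j 0]
        else if j = columna_1 - 1 then
          nueva_fila ++ [PySem.List.pyGetD fila (columna_2 - 1) 0]
        else if j = columna_2 - 1 then
          nueva_fila ++ [PySem.List.pyGetD fila (columna_1 - 1) 0]
        else nueva_fila) []]) []

def superanSalarioActividad04 (matriz : List (List Int)) (umbral : Int) : List (List Int) :=
  if matriz.length = 0 then []
  else
    let st := (PySem.List.pyGetD matriz 1 []).foldl
      (fun (st : List (List Int) × Int) salario =>
        (if salario > umbral then
           st.1 ++ [matriz.foldl (fun valido i => valido ++ [PySem.List.pyGetD i st.2 0]) []]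
         else st.1,
         st.2 + 1)) ([], 0)
    cambiarColumnas (cambiarColumnas st.1 2 3) 3 4

-- ===== PORT B =====
def superanSalarioActividad04_alt (matriz : List (List Int)) (umbral : Int) : List (List Int) :=
  if matriz.length = 0 then []
  else
    let selected := ((PySem.List.enumerate (PySem.List.pyGetD matriz 1 []) 0).filter
        (fun p => p.2 > umbral)).map (fun p => p.1)
    let order : List Int := [0, 2, 3, 1] ++ PySem.List.pyRange 4 (matriz.length : Int) 1
    selected.map (fun idx => order.map (fun r =>
      PySem.List.pyGetD (PySem.List.pyGetD matriz r []) idx 0))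

-- ===== PRECONDITION & SPEC =====
-- Pre_ excludes exactly the inputs on which the Python A raises IndexError: a nonempty matrix with
-- fewer than 2 rows (matriz[1]), a selected column shorter than some row access needs, or a selected
-- column with fewer than 4 rows (the two column swaps index positions 2 and 3 of each extracted column).
def Pre_superanSalarioActividad04 (matriz : List (List Int)) (umbral : Int) : Prop :=
  matriz = [] ∨ (2 ≤ matriz.length ∧
    ∀ idx : Nat, idx < (PySem.List.pyGetD matriz 1 []).length →
      (PySem.List.pyGetD matriz 1 []).getD idx 0 > umbral →
      (4 ≤ matriz.length ∧ ∀ fila ∈ matriz, idx < fila.length))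
instance (matriz : List (List Int)) (umbral : Int) : Decidable (Pre_superanSalarioActividad04 matriz umbral) := by unfold Pre_superanSalarioActividad04; infer_instance

def pvWitness_superanSalarioActividad04 : List (List Int) × Int :=
  ([[1, 2, 3], [5, 0, 8], [9, 10, 11], [13, 14, 15]], 3)

def Spec_superanSalarioActividad04 (matriz : List (List Int)) (umbral : Int) (out : List (List Int)) : Prop := out = superanSalarioActividad04_alt matriz umbral
instance (matriz : List (List Int)) (umbral : Int) (out : List (List Int)) : Decidable (Spec_superanSalarioActividad04 matriz umbral out) := by unfold Spec_superanSalarioActividad04; infer_instance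

-- ===== CLAIM (what is proved, stated in full; the proofs are below) =====
def Claim_equal_superanSalarioActividad04 : Prop := ∀ (matriz : List (List Int)) (umbral : Int), Dom_superanSalarioActividad04 matriz umbral → Pre_superanSalarioActividad04 matriz umbral → Spec_superanSalarioActividad04 matriz umbral (superanSalarioActividad04 matriz umbral)

-- ===== LEMMAS AND PROOFS =====

-- the row transformation cambiarColumnas performs, as a pure function of the index
def hRow (fila : List Int) (c1 c2 : Int) (j : Int) : Int :=
  if j = c1 - 1 then PySem.List.pyGetD fila (c2 - 1) 0
  else if j = c2 - 1 then PySem.List.pyGetD fila (c1 - 1) 0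
  else PySem.List.pyGetD fila j 0

lemma cambiar_eq_map (m : List (List Int)) (c1 c2 : Int) :
    cambiarColumnas m c1 c2
      = m.map (fun fila => (PySem.List.pyRange 0 (fila.length : Int) 1).map (hRow fila c1 c2)) := by
  unfold cambiarColumnas
  have hfn : ∀ fila : List Int,
      (fun (nueva_fila : List Int) (j : Int) =>
        if j ≠ c1 - 1 ∧ j ≠ c2 - 1 then nueva_fila ++ [PySem.List.pyGetD fila j 0]
        else if j = c1 - 1 then nueva_fila ++ [PySem.List.pyGetD fila (c2 - 1) 0]
        else if j = c2 - 1 then nueva_fila ++ [PySem.List.pyGetD fila (c1 - 1) 0]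
        else nueva_fila)
      = (fun nueva_fila j => nueva_fila ++ [hRow fila c1 c2 j]) := by
    intro fila
    funext nf j
    by_cases h1 : j = c1 - 1 <;> by_cases h2 : j = c2 - 1 <;>
      simp [hRow, h1, h2] <;> split_ifs <;> rfl
  rw [PySem.List.foldl_append_singleton_eq_map
        (fun fila => (PySem.List.pyRange 0 (fila.length : Int) 1).foldl
          (fun (nueva_fila : List Int) (j : Int) =>
            if j ≠ c1 - 1 ∧ j ≠ c2 - 1 then nueva_fila ++ [PySem.List.pyGetD fila j 0]
            else if j = c1 - 1 then nueva_fila ++ [PySem.List.pyGetD fila (c2 - 1) 0]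
            else if j = c2 - 1 then nueva_fila ++ [PySem.List.pyGetD fila (c1 - 1) 0]
            else nueva_fila) [])]
  simp only [List.nil_append]
  refine List.map_congr_left (fun fila _ => ?_)
  rw [hfn fila, PySem.List.foldl_append_singleton_eq_map, List.nil_append]

lemma loopA (matriz : List (List Int)) (umbral : Int) :
    ∀ (l : List Int) (acc : List (List Int)) (k : Int),
      l.foldl (fun (st : List (List Int) × Int) salario =>
          (if salario > umbral then
             st.1 ++ [matriz.foldl (fun valido i => valido ++ [PySem.List.pyGetD i st.2 0]) []]
           else st.1, st.2 + 1)) (acc, k)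
        = (acc ++ ((PySem.List.enumerate l k).filter (fun p => p.2 > umbral)).map
             (fun p => matriz.foldl (fun valido i => valido ++ [PySem.List.pyGetD i p.1 0]) []),
           k + l.length) := by
  intro l
  induction l with
  | nil => intro acc k; simp [PySem.List.enumerate_nil]
  | cons x xs ih =>
    intro acc k
    rw [List.foldl_cons, PySem.List.enumerate_cons]
    by_cases hx : x > umbral
    · rw [List.filter_cons_of_pos (by simpa using hx), ih]
      simp only [hx, if_pos, List.map_cons, List.length_cons]
      refine Prod.ext ?_ ?_
      · simp [List.append_assoc]
      · push_cast; ring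
    · rw [List.filter_cons_of_neg (by simpa using hx), ih]
      simp only [hx, List.length_cons]
      refine Prod.ext ?_ ?_
      · simp
      · push_cast; ring

lemma swap_perm (v : List Int) (h4 : 4 ≤ v.length) :
    (PySem.List.pyRange 0
        ((((PySem.List.pyRange 0 (v.length : Int) 1).map (hRow v 2 3)).length : Int)) 1).map
        (hRow ((PySem.List.pyRange 0 (v.length : Int) 1).map (hRow v 2 3)) 3 4)
      = ([0, 2, 3, 1] ++ PySem.List.pyRange 4 (v.length : Int) 1).map
          (fun r => PySem.List.pyGetD v r 0) := by
  set n : Int := (v.length : Int) with hn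
  have hn4 : (4 : Int) ≤ n := by omega
  set w := (PySem.List.pyRange 0 n 1).map (hRow v 2 3) with hw
  have hwlen : (w.length : Int) = n := by
    simp [hw, PySem.List.length_pyRange_one]
    omega
  have hwget : ∀ j : Int, 0 ≤ j → j < n → PySem.List.pyGetD w j 0 = hRow v 2 3 j := by
    intro j h0 h1
    exact PySem.List.pyGetD_map_pyRange_of_nonneg _ n j 0 h0 h1
  rw [hwlen, PySem.List.pyRange_one_append 0 4 n (by omega) hn4, List.map_append]
  have hhead : PySem.List.pyRange 0 4 1 = ([0, 1, 2, 3] : List Int) := by decide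
  rw [hhead, List.map_append]
  congr 1
  · have g0 := hwget 0 (by omega) (by omega)
    have g1 := hwget 1 (by omega) (by omega)
    have g2 := hwget 2 (by omega) (by omega)
    have g3 := hwget 3 (by omega) (by omega)
    simp only [hRow] at g0 g1 g2 g3 ⊢
    norm_num at g0 g1 g2 g3 ⊢
    exact ⟨g0, g1, g3, g2⟩
  · refine List.map_congr_left (fun j hj => ?_)
    obtain ⟨hj4, hjn⟩ := PySem.List.mem_pyRange_one.1 hj
    rw [show hRow w 3 4 j = PySem.List.pyGetD w j 0 by
          unfold hRow; rw [if_neg (by omega), if_neg (by omega)],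
        hwget j (by omega) hjn,
        show hRow v 2 3 j = PySem.List.pyGetD v j 0 by
          unfold hRow; rw [if_neg (by omega), if_neg (by omega)]]

-- ===== VERDICT (by name: the statement is the Claim_ definition above) =====
theorem superanSalarioActividad04_spec : Claim_equal_superanSalarioActividad04 := by
  intro matriz umbral _ hpre
  unfold Spec_superanSalarioActividad04
  rcases hpre with rfl | ⟨h2, hsel⟩
  · rfl
  · have hne : ¬ matriz.length = 0 := by omega
    unfold superanSalarioActividad04 superanSalarioActividad04_alt
    simp only [if_neg hne]
    rw [loopA matriz umbral (PySem.List.pyGetD matriz 1 []) [] 0]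
    dsimp only
    rw [cambiar_eq_map, cambiar_eq_map, List.map_map, List.nil_append, List.map_map, List.map_map]
    simp only [Function.comp_def]
    refine List.map_congr_left (fun p hp => ?_)
    obtain ⟨hpmem, hpval⟩ := List.mem_filter.1 hp
    obtain ⟨k, hk, rfl⟩ := (PySem.List.mem_enumerate_iff _ _ _).1 hpmem
    have hval : (PySem.List.pyGetD matriz 1 [])[k] > umbral := by simpa using hpval
    have h4 : 4 ≤ matriz.length :=
      (hsel k hk (by rw [List.getD_eq_getElem _ _ hk]; exact hval)).1
    have hcol : matriz.foldl
        (fun valido i => valido ++ [PySem.List.pyGetD i ((0 : Int) + (k : Int), (PySem.List.pyGetD matriz 1 [])[k]).1 0]) []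
        = matriz.map (fun i => PySem.List.pyGetD i ((0 : Int) + (k : Int)) 0) := by
      simpa using PySem.List.foldl_append_singleton_eq_map
        (fun i => PySem.List.pyGetD i ((0 : Int) + (k : Int)) 0) matriz []
    rw [hcol]
    have h4' : 4 ≤ (matriz.map (fun i => PySem.List.pyGetD i ((0 : Int) + (k : Int)) 0)).length := by
      simpa using h4
    rw [swap_perm _ h4']
    simp only [List.length_map]
    refine List.map_congr_left (fun r hr => ?_)
    have hr' : 0 ≤ r ∧ r < (matriz.length : Int) := by
      rcases List.mem_append.1 hr with hr | hr
      · have h4i : (4 : Int) ≤ (matriz.length : Int) := by exact_mod_cast h4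
        fin_cases hr <;> omega
      · have := PySem.List.mem_pyRange_one.1 hr
        omega
    rw [PySem.List.pyGetD_eq_getElem _ _ hr'.1 (by simpa using hr'.2),
        PySem.List.pyGetD_eq_getElem matriz _ hr'.1 hr'.2]
    simp
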